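-- pv_equiv track=rewrite | github.com/yanhs/orchestra | cashbot/cashbot/proposal.py | _txt_to_md
-- ===== SOURCE A (Python) =====
-- def _txt_to_md(text: str) -> str:
--     """
--     Минимальная конвертация plain text → Markdown.
--     Заголовки (строки из символов =) → ## заголовки.
--     """
--     lines = text.splitlines()
--     result = []
--     i = 0
--     while i < len(lines):
--         line = lines[i]
--         # Следующая строка из '=' → это заголовок
--         if i + 1 < len(lines) and lines[i + 1].startswith("==="):
--             result.append(f"## {line}")
--             i += 2  # пропускаем строку с '==='
--             continue
--         result.append(line)
--         i += 1
--     return "\n".join(result)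
-- ===== SOURCE B (Python) =====
-- def _txt_to_md(text: str) -> str:
--     result = []
--     prev_was_underline = False
--     for line in text.splitlines():
--         if line.startswith("===") and result and not prev_was_underline:
--             prior = result.pop()
--             result.append(f"## {prior}")
--             prev_was_underline = True
--         else:
--             result.append(line)
--             prev_was_underline = False
--     return "\n".join(result)
-- ===== Notes on version B (the rewrite author's own statement) =====
-- stated objective: alternative
-- what changed: Replaces A's index-jumping while loop with lookahead (peek at lines[i+1], skip two) by a single forward fold that appends every line and, on seeing an '===' line, retroactively pops and upgrades the previously appended line, guarded by a look-behind flag.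
import Mathlib
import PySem

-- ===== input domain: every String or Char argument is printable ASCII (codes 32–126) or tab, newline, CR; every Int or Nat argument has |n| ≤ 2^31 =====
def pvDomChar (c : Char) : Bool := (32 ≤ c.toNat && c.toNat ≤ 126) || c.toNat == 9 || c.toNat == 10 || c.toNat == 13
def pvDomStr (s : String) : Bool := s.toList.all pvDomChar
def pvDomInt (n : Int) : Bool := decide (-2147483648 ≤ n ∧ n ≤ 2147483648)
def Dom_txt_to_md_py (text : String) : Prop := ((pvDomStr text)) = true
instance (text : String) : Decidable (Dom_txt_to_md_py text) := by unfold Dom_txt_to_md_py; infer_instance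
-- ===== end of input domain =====

-- B replaces A's lookahead-and-index-jump while loop by a single forward pass with a
-- look-behind flag that retroactively upgrades the previous line (objective: alternative).

-- ===== PORT A =====
-- A's while loop over an index i that advances by 1 or 2; the `i + 1 < len(lines)` guard
-- and `lines[i+1].startswith("===")` are transliterated as the nested condition below.
def txt_to_md_py_loop (lines : List String) (i : Nat) (result : List String) : List String :=
  if h : i < lines.length then
    let line := lines[i]
    if h2 : i + 1 < lines.length then
      if PySem.Str.startswith lines[i+1] "===" then
        txt_to_md_py_loop lines (i + 2) (result ++ ["## " ++ line])
      else
        txt_to_md_py_loop lines (i + 1) (result ++ [line])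
    else
      txt_to_md_py_loop lines (i + 1) (result ++ [line])
  else result
termination_by lines.length - i

def txt_to_md_py (text : String) : String :=
  let lines := PySem.Str.splitlines text
  PySem.Str.join "\n" (txt_to_md_py_loop lines 0 [])

-- ===== PORT B =====
-- one fold step of B's for loop; state = (result, prev_was_underline)
def txt_to_md_py_step (st : List String × Bool) (line : String) : List String × Bool :=
  if PySem.Str.startswith line "===" && !st.1.isEmpty && !st.2 then
    (st.1.dropLast ++ ["## " ++ st.1.getLast!], true)   -- pop prior, append "## {prior}"
  else
    (st.1 ++ [line], false)

def txt_to_md_py_alt (text : String) : String :=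
  let st := (PySem.Str.splitlines text).foldl txt_to_md_py_step ([], false)
  PySem.Str.join "\n" st.1

-- ===== PRECONDITION & SPEC =====
def Spec_txt_to_md_py (text : String) (out : String) : Prop := out = txt_to_md_py_alt text
instance (text : String) (out : String) : Decidable (Spec_txt_to_md_py text out) := by unfold Spec_txt_to_md_py; infer_instance

-- ===== CLAIM (what is proved, stated in full; the proofs are below) =====
def Claim_equal_txt_to_md_py : Prop := ∀ (text : String), Dom_txt_to_md_py text → Spec_txt_to_md_py text (txt_to_md_py text)

-- ===== LEMMAS AND PROOFS =====

-- common reference function: the headline-converted line list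
def aGo : List String → List String
  | [] => []
  | [l] => [l]
  | l :: u :: r =>
    if PySem.Str.startswith u "===" then ("## " ++ l) :: aGo r
    else l :: aGo (u :: r)

-- the prev_was_underline flag B's fold ends with, from a "pending last line" state
def eFlag : List String → Bool
  | [] => true
  | [_] => false
  | _ :: u :: r =>
    if PySem.Str.startswith u "===" then (match r with | [] => true | _ :: _ => eFlag r)
    else eFlag (u :: r)

lemma aLoop_eq (lines : List String) (i : Nat) (result : List String) :
    txt_to_md_py_loop lines i result = result ++ aGo (lines.drop i) := by
  induction i, result using txt_to_md_py_loop.induct (lines := lines) with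
  | case1 i result h line h2 hsw ih =>
    have hl : line = lines[i] := rfl
    rw [hl] at ih
    have hsw' : PySem.Chars.startswith (lines[i+1]).toList ['=', '=', '='] = true := by
      simpa using hsw
    rw [txt_to_md_py_loop]
    simp only [h, h2, hsw, dif_pos, if_pos]
    rw [ih, List.drop_eq_getElem_cons h, List.drop_eq_getElem_cons h2]
    simp [aGo, hsw']
  | case2 i result h line h2 hsw ih =>
    have hl : line = lines[i] := rfl
    rw [hl] at ih
    have hsw' : PySem.Chars.startswith (lines[i+1]).toList ['=', '=', '='] = false := by
      simpa using hsw
    rw [txt_to_md_py_loop]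
    simp only [h, h2, hsw, dif_pos, if_neg, Bool.false_eq_true, not_false_iff]
    rw [ih, List.drop_eq_getElem_cons h, List.drop_eq_getElem_cons h2]
    simp [aGo, hsw']
  | case3 i result h line h2 ih =>
    have hl : line = lines[i] := rfl
    rw [hl] at ih
    rw [txt_to_md_py_loop]
    simp only [h, h2, dif_pos]
    rw [ih, List.drop_eq_getElem_cons h]
    have hd : lines.drop (i + 1) = [] := List.drop_eq_nil_of_le (by omega)
    simp [hd, aGo]
  | case4 i result h =>
    rw [txt_to_md_py_loop]
    have hd : lines.drop i = [] := List.drop_eq_nil_of_le (by omega)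
    simp [h, hd, aGo]

-- B's fold from a pending state (last appended line l, flag false) computes aGo
lemma bFold_pending (n : Nat) : ∀ (rest : List String), rest.length ≤ n →
    ∀ (res : List String) (l : String),
      List.foldl txt_to_md_py_step (res ++ [l], false) rest
        = (res ++ aGo (l :: rest), eFlag (l :: rest)) := by
  induction n with
  | zero =>
    intro rest hlen res l
    have : rest = [] := List.eq_nil_of_length_eq_zero (by omega)
    subst this; simp [aGo, eFlag]
  | succ n ih =>
    intro rest hlen res l
    cases rest with
    | nil => simp [aGo, eFlag]
    | cons u r =>
      by_cases hu : PySem.Chars.startswith u.toList ['=', '=', '='] = true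
      · -- pop l, append "## l", flag true; then run from a flag-true state
        have hstep : txt_to_md_py_step (res ++ [l], false) u
            = (res ++ ["## " ++ l], true) := by
          simp [txt_to_md_py_step, hu]
        cases r with
        | nil =>
          simp only [List.foldl_cons, hstep, List.foldl_nil]
          simp [aGo, eFlag, hu]
        | cons v r' =>
          -- first step from flag=true appends v with flag false → pending state on v
          have hstep2 : txt_to_md_py_step (res ++ ["## " ++ l], true) v
              = ((res ++ ["## " ++ l]) ++ [v], false) := by
            simp [txt_to_md_py_step]
          have hr' : r'.length ≤ n := by simp at hlen; omega
          simp only [List.foldl_cons, hstep, hstep2,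
            ih r' hr' (res ++ ["## " ++ l]) v]
          simp [aGo, eFlag, hu]
      · -- append u with flag false → pending state on u
        have hstep : txt_to_md_py_step (res ++ [l], false) u
            = ((res ++ [l]) ++ [u], false) := by
          simp [txt_to_md_py_step, hu]
        have hr : r.length ≤ n := by simp at hlen; omega
        simp only [List.foldl_cons, hstep, ih r hr (res ++ [l]) u]
        simp [aGo, eFlag, hu]

lemma bFold_eq (lines : List String) :
    (List.foldl txt_to_md_py_step ([], false) lines).1 = aGo lines := by
  cases lines with
  | nil => simp [aGo]
  | cons l r =>
    have hstep : txt_to_md_py_step ([], false) l = (([] : List String) ++ [l], false) := by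
      simp [txt_to_md_py_step]
    rw [List.foldl_cons, hstep, bFold_pending r.length r le_rfl [] l]
    simp

-- ===== VERDICT (by name: the statement is the Claim_ definition above) =====
theorem txt_to_md_py_spec : Claim_equal_txt_to_md_py := by
  intro text _
  show PySem.Str.join "\n" (txt_to_md_py_loop (PySem.Str.splitlines text) 0 [])
      = PySem.Str.join "\n" ((List.foldl txt_to_md_py_step ([], false) (PySem.Str.splitlines text)).1)
  rw [aLoop_eq, bFold_eq]
  simp
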